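-- pv_equiv track=rewrite | github.com/yongchann/problem-solving | 프로그래머스/2/172927. 광물 캐기/광물 캐기.py | solution
-- ===== SOURCE A (Python) =====
-- def solution(picks, minerals):
--     answer = 0
--
--     if sum(picks) * 5 < len(minerals):
--         minerals = minerals[:sum(picks)*5]
--
--     picks = ["stone"]*picks[2] + ["iron"]*picks[1] + ["diamond"]*picks[0]
--     info = {
--         "diamond":{"diamond":1, "iron":1, "stone":1},
--         "iron":{"diamond":5, "iron":1, "stone":1},
--         "stone":{"diamond":25, "iron":5, "stone":1}
--     }
--
--     # 5개 단위로 묶음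
--     bulks = [minerals[i:i+5] for i in range(0, len(minerals), 5)]
--
--     # 묶음별 가중치 합 오름차순 정렬
--     bulks.sort(key=lambda x : sum(info["stone"][i] for i in x))
--
--     # 가중치가 가장 높은 묶음에 상위 곡괭이 사용
--     while bulks and picks:
--         bulk = bulks.pop()
--         pick = picks.pop()
--
--         for b in bulk:
--             answer += info[pick][b]
--
--     return answer
-- ===== SOURCE B (Python) =====
-- def solution(picks, minerals):
--     total = sum(picks) * 5
--     if total < len(minerals):
--         minerals = minerals[:total]
--     # counting sort: bucket each 5-chunk's (diamond, iron, stone) counts by its stone-pick weight (0..125)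
--     buckets = [[] for _ in range(126)]
--     for i in range(0, len(minerals), 5):
--         nd = ni = ns = 0
--         for m in minerals[i:i+5]:
--             if m == "diamond":
--                 nd += 1
--             elif m == "iron":
--                 ni += 1
--             else:
--                 ns += 1
--         buckets[25 * nd + 5 * ni + ns].append((nd, ni, ns))
--     d, it, st = picks[0], picks[1], picks[2]
--     answer = 0
--     for w in range(125, -1, -1):
--         for nd, ni, ns in reversed(buckets[w]):
--             if d > 0:
--                 answer += nd + ni + ns
--                 d -= 1
--             elif it > 0:
--                 answer += 5 * nd + ni + ns
--                 it -= 1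
--             elif st > 0:
--                 answer += 25 * nd + 5 * ni + ns
--                 st -= 1
--             else:
--                 return answer
--     return answer
-- ===== Notes on version B (the rewrite author's own statement) =====
-- stated objective: faster
-- what changed: B replaces A's comparison sort of 5-chunks (keyed by per-mineral dict-lookup sums) and its materialised pick-name list with a counting sort: each chunk is reduced once to a (diamond,iron,stone) count triple and dropped into one of 126 weight buckets, which are then drained from heaviest to lightest while three integer pick counters decrement.
import Mathlib
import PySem

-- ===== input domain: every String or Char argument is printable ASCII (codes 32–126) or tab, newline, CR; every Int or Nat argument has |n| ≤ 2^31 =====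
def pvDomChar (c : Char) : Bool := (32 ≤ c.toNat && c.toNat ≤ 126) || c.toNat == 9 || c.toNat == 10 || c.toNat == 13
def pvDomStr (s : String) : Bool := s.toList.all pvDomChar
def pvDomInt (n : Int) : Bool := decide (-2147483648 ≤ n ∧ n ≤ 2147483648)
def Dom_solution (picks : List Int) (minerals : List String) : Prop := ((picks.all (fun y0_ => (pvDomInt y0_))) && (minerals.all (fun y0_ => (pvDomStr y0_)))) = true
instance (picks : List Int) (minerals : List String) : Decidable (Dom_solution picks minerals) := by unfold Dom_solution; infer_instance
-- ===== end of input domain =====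

-- B replaces A's comparison sort of 5-chunks (keyed by per-mineral dict-lookup sums) and its
-- materialised pick-name list with a counting sort into 126 weight buckets of count triples,
-- drained heaviest-first against three decrementing pick counters (objective: faster).

-- ===== PORT A =====
def infoA : PySem.Dict String (PySem.Dict String Int) :=
  PySem.Dict.ofList
    [("diamond", PySem.Dict.ofList [("diamond", 1), ("iron", 1), ("stone", 1)]),
     ("iron",    PySem.Dict.ofList [("diamond", 5), ("iron", 1), ("stone", 1)]),
     ("stone",   PySem.Dict.ofList [("diamond", 25), ("iron", 5), ("stone", 1)])]

-- info[pick][b]; the Python raises KeyError on a key outside the table — exact under Pre_,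
-- which admits only the three mineral names inside the truncated prefix.
def wA (pick m : String) : Int := PySem.Dict.getD (PySem.Dict.getD infoA pick PySem.Dict.empty) m 0

-- the `while bulks and picks:` loop, popping from the back of both lists
def goA (bs : List (List String)) (ps : List String) (acc : Int) : Int :=
  if h : bs ≠ [] ∧ ps ≠ [] then
    goA bs.dropLast ps.dropLast
      ((bs.getLast h.1).foldl (fun a m => a + wA (ps.getLast h.2) m) acc)
  else acc
termination_by bs.length
decreasing_by
  have := List.length_pos_iff.mpr h.1
  simp [List.length_dropLast]; omega

def solution (picks : List Int) (minerals : List String) : Int :=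
  let minerals' := if picks.sum * 5 < (minerals.length : Int)
    then PySem.List.slice minerals none (some (picks.sum * 5)) else minerals
  let picksL := PySem.List.pyRepeat ["stone"] (PySem.List.pyGetD picks 2 0)
      ++ PySem.List.pyRepeat ["iron"] (PySem.List.pyGetD picks 1 0)
      ++ PySem.List.pyRepeat ["diamond"] (PySem.List.pyGetD picks 0 0)
  let bulks := (PySem.List.pyRange 0 (minerals'.length : Int) 5).map
      (fun i => PySem.List.slice minerals' (some i) (some (i + 5)))
  goA (PySem.List.sorted bulks (fun x => (x.map (fun m => wA "stone" m)).sum) false) picksL 0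

-- ===== PORT B =====
-- the inner counting loop `for m in minerals[i:i+5]: if/elif/else`
def cntB (c : List String) : Int × Int × Int :=
  c.foldl (fun t m =>
    if m = "diamond" then (t.1 + 1, t.2.1, t.2.2)
    else if m = "iron" then (t.1, t.2.1 + 1, t.2.2)
    else (t.1, t.2.1, t.2.2 + 1)) (0, 0, 0)

def wkey (g : Int × Int × Int) : Int := 25 * g.1 + 5 * g.2.1 + g.2.2

-- buckets[w].append(g); the index 25*nd+5*ni+ns always lies in 0..125 (a chunk has ≤ 5 minerals),
-- so getD/set never clamp
def bupd (bs : List (List (Int × Int × Int))) (g : Int × Int × Int) :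
    List (List (Int × Int × Int)) :=
  bs.set (wkey g).toNat (bs.getD (wkey g).toNat [] ++ [g])

-- one step of the scoring loop; `none` is the early `return answer`
def mineStep (st : Int × Int × Int × Int) (g : Int × Int × Int) :
    Option (Int × Int × Int × Int) :=
  if st.1 > 0 then some (st.1 - 1, st.2.1, st.2.2.1, st.2.2.2 + (g.1 + g.2.1 + g.2.2))
  else if st.2.1 > 0 then some (st.1, st.2.1 - 1, st.2.2.1, st.2.2.2 + (5 * g.1 + g.2.1 + g.2.2))
  else if st.2.2.1 > 0 then some (st.1, st.2.1, st.2.2.1 - 1, st.2.2.2 + (25 * g.1 + 5 * g.2.1 + g.2.2))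
  else none

-- `for nd, ni, ns in reversed(buckets[w]):` — Bool = the early return fired
def runBulks (st : Int × Int × Int × Int) :
    List (Int × Int × Int) → (Int × Int × Int × Int) × Bool
  | [] => (st, false)
  | g :: r => match mineStep st g with
    | some st' => runBulks st' r
    | none => (st, true)

-- `for w in range(125, -1, -1):`
def runWeights (buckets : List (List (Int × Int × Int))) (st : Int × Int × Int × Int) :
    List Int → (Int × Int × Int × Int) × Bool
  | [] => (st, false)
  | w :: ws =>
    match runBulks st ((buckets.getD w.toNat []).reverse) with
    | (st', true) => (st', true)
    | (st', false) => runWeights buckets st' ws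

def solution_alt (picks : List Int) (minerals : List String) : Int :=
  let total := picks.sum * 5
  let minerals' := if total < (minerals.length : Int)
    then PySem.List.slice minerals none (some total) else minerals
  let buckets := (PySem.List.pyRange 0 (minerals'.length : Int) 5).foldl
    (fun bs i => bupd bs (cntB (PySem.List.slice minerals' (some i) (some (i + 5)))))
    (List.replicate 126 [])
  (runWeights buckets
    (PySem.List.pyGetD picks 0 0, PySem.List.pyGetD picks 1 0, PySem.List.pyGetD picks 2 0, 0)
    (PySem.List.pyRange 125 (-1) (-1))).1.2.2.2

-- ===== PRECONDITION & SPEC =====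
-- Pre_ restricts to the task's natural domain: at least three pick counts (A raises IndexError
-- otherwise) and every mineral of the truncated prefix one of the three names (A raises
-- KeyError otherwise).
def Pre_solution (picks : List Int) (minerals : List String) : Prop :=
  3 ≤ picks.length ∧
  (∀ m ∈ (if picks.sum * 5 < (minerals.length : Int)
          then PySem.List.slice minerals none (some (picks.sum * 5)) else minerals),
    m = "diamond" ∨ m = "iron" ∨ m = "stone")
instance (picks : List Int) (minerals : List String) : Decidable (Pre_solution picks minerals) := by
  unfold Pre_solution; infer_instance

def pvWitness_solution : List Int × List String :=
  ([1, 1, 1], ["diamond", "stone", "stone", "iron", "stone", "stone"])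

def Spec_solution (picks : List Int) (minerals : List String) (out : Int) : Prop := out = solution_alt picks minerals
instance (picks : List Int) (minerals : List String) (out : Int) : Decidable (Spec_solution picks minerals out) := by unfold Spec_solution; infer_instance

-- ===== CLAIM (what is proved, stated in full; the proofs are below) =====
def Claim_equal_solution : Prop := ∀ (picks : List Int) (minerals : List String), Dom_solution picks minerals → Pre_solution picks minerals → Spec_solution picks minerals (solution picks minerals)

-- ===== LEMMAS AND PROOFS =====

-- the three admissible mineral names
def validM (m : String) : Prop := m = "diamond" ∨ m = "iron" ∨ m = "stone"

-- the pick-name list A materialises (s stones, i irons, d diamonds; popped from the back)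
def pileQ (s i d : Int) : List String :=
  List.replicate s.toNat "stone" ++ List.replicate i.toNat "iron" ++ List.replicate d.toNat "diamond"

-- B's nested scoring loops flattened to one list of triples
def scoreFlat : (Int × Int × Int × Int) → List (Int × Int × Int) → Int
  | st, [] => st.2.2.2
  | st, g :: r => match mineStep st g with
    | some st' => scoreFlat st' r
    | none => st.2.2.2

-- concatenation of the weight buckets of gs, ascending
def bcat (gs : List (Int × Int × Int)) : Nat → List (Int × Int × Int)
  | 0 => []
  | W + 1 => bcat gs W ++ gs.filter (fun g => decide (wkey g = (W : Int)))

def cstep (t : Int × Int × Int) (m : String) : Int × Int × Int :=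
  if m = "diamond" then (t.1 + 1, t.2.1, t.2.2)
  else if m = "iron" then (t.1, t.2.1 + 1, t.2.2)
  else (t.1, t.2.1, t.2.2 + 1)

lemma cntB_eq_foldl_cstep (c : List String) : cntB c = c.foldl cstep (0, 0, 0) := rfl

lemma cstep_bounds (c : List String) (t : Int × Int × Int) :
    t.1 ≤ (c.foldl cstep t).1 ∧ t.2.1 ≤ (c.foldl cstep t).2.1 ∧ t.2.2 ≤ (c.foldl cstep t).2.2 ∧
    (c.foldl cstep t).1 + (c.foldl cstep t).2.1 + (c.foldl cstep t).2.2
      = t.1 + t.2.1 + t.2.2 + (c.length : Int) := by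
  induction c generalizing t with
  | nil => simp
  | cons m c ih =>
    simp only [List.foldl_cons, List.length_cons, Nat.cast_add, Nat.cast_one]
    have h := ih (cstep t m)
    by_cases h1 : m = "diamond"
    · have e : cstep t m = (t.1 + 1, t.2.1, t.2.2) := by simp [cstep, h1]
      rw [e] at h ⊢
      dsimp only at h
      omega
    · by_cases h2 : m = "iron"
      · have e : cstep t m = (t.1, t.2.1 + 1, t.2.2) := by simp [cstep, h2]
        rw [e] at h ⊢
        dsimp only at h
        omega
      · have e : cstep t m = (t.1, t.2.1, t.2.2 + 1) := by simp [cstep, h1, h2]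
        rw [e] at h ⊢
        dsimp only at h
        omega

lemma cstep_counts (c : List String) (h : ∀ m ∈ c, validM m) (t : Int × Int × Int) :
    c.foldl cstep t = (t.1 + (c.count "diamond" : Int), t.2.1 + (c.count "iron" : Int),
      t.2.2 + (c.count "stone" : Int)) := by
  induction c generalizing t with
  | nil => simp
  | cons m c ih =>
    have hm := h m (by simp)
    have hrest : ∀ x ∈ c, validM x := fun x hx => h x (by simp [hx])
    simp only [List.foldl_cons]
    rw [ih hrest]
    rcases hm with rfl | rfl | rfl <;>
      simp [cstep, Prod.ext_iff] <;> omega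

lemma sum_map_of_valid (f : String → Int) (c : List String) (h : ∀ m ∈ c, validM m) :
    (c.map f).sum = f "diamond" * (c.count "diamond" : Int)
      + f "iron" * (c.count "iron" : Int) + f "stone" * (c.count "stone" : Int) := by
  induction c with
  | nil => simp
  | cons m c ih =>
    have hm := h m (by simp)
    have hrest : ∀ x ∈ c, validM x := fun x hx => h x (by simp [hx])
    rcases hm with hm | hm | hm <;> subst hm <;> simp [ih hrest] <;> ring

lemma wA_eval :
    (∀ m, validM m → wA "diamond" m = 1) ∧
    (wA "iron" "diamond" = 5 ∧ wA "iron" "iron" = 1 ∧ wA "iron" "stone" = 1) ∧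
    (wA "stone" "diamond" = 25 ∧ wA "stone" "iron" = 5 ∧ wA "stone" "stone" = 1) := by
  refine ⟨?_, by decide, by decide⟩
  intro m hm
  rcases hm with rfl | rfl | rfl <;> decide

-- B's chunk weight is A's sort key
lemma wkey_cntB (c : List String) (h : ∀ m ∈ c, validM m) :
    wkey (cntB c) = (c.map (fun m => wA "stone" m)).sum := by
  obtain ⟨_, _, wS⟩ := wA_eval
  rw [sum_map_of_valid _ c h, wS.1, wS.2.1, wS.2.2,
    cntB_eq_foldl_cstep, cstep_counts c h]
  simp [wkey]

lemma wkey_cntB_bounds (c : List String) (hlen : c.length ≤ 5) :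
    0 ≤ wkey (cntB c) ∧ wkey (cntB c) < 126 := by
  obtain ⟨h1, h2, h3, h4⟩ := cstep_bounds c (0, 0, 0)
  have h5 : (c.length : Int) ≤ 5 := by exact_mod_cast hlen
  rw [cntB_eq_foldl_cstep]
  simp only [wkey]
  simp at h1 h2 h3 h4
  omega

-- ---- flattening B's nested loops ----

lemma scoreFlat_append (L M : List (Int × Int × Int)) (st : Int × Int × Int × Int) :
    scoreFlat st (L ++ M) =
      (match runBulks st L with
        | (st', true) => st'.2.2.2
        | (st', false) => scoreFlat st' M) := by
  induction L generalizing st with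
  | nil => simp [runBulks]
  | cons g L ih =>
    cases hms : mineStep st g with
    | some st' => simp [scoreFlat, runBulks, hms, ih]
    | none => simp [scoreFlat, runBulks, hms]

lemma runWeights_eq_scoreFlat (buckets : List (List (Int × Int × Int))) (ws : List Int)
    (st : Int × Int × Int × Int) :
    (runWeights buckets st ws).1.2.2.2
      = scoreFlat st (ws.flatMap (fun w => (buckets.getD w.toNat []).reverse)) := by
  induction ws generalizing st with
  | nil => simp [runWeights, scoreFlat]
  | cons w ws ih =>
    simp only [List.flatMap_cons]
    rw [scoreFlat_append]
    rcases hrb : runBulks st ((buckets.getD w.toNat []).reverse) with ⟨st', b⟩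
    cases b
    · simp only [runWeights, hrb]
      exact ih st'
    · simp only [runWeights, hrb]

-- ---- the bucket build computes the weight-filtered sublists ----

lemma foldl_bupd_getD (gs : List (Int × Int × Int)) (hk : ∀ g ∈ gs, 0 ≤ wkey g ∧ wkey g < 126)
    (bs : List (List (Int × Int × Int))) (hlen : bs.length = 126) (w : Nat) (hw : w < 126) :
    (gs.foldl bupd bs).getD w [] = bs.getD w [] ++ gs.filter (fun g => decide (wkey g = (w : Int))) := by
  induction gs generalizing bs with
  | nil => simp
  | cons g gs ih =>
    obtain ⟨hg0, hg1⟩ := hk g (by simp)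
    have hkrest : ∀ g ∈ gs, 0 ≤ wkey g ∧ wkey g < 126 := fun g hg => hk g (by simp [hg])
    have hlen' : (bupd bs g).length = 126 := by simp [bupd, hlen]
    simp only [List.foldl_cons, List.filter_cons]
    rw [ih hkrest (bupd bs g) hlen']
    by_cases hkw : wkey g = (w : Int)
    · have hkn : (wkey g).toNat = w := by omega
      simp [bupd, List.getD_eq_getElem?_getD, hlen, hw, hkw]
    · have hkn : (wkey g).toNat ≠ w := by omega
      simp [bupd, List.getD_eq_getElem?_getD, hkn, hkw]

-- ---- counting sort agrees with Python's stable sort ----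

lemma bcat_nil (W : Nat) : bcat [] W = [] := by
  induction W with
  | zero => rfl
  | succ W ih => simp [bcat, ih]

lemma mem_bcat (gs : List (Int × Int × Int)) (W : Nat) (y : Int × Int × Int)
    (hy : y ∈ bcat gs W) : ∃ w : Nat, w < W ∧ wkey y = (w : Int) := by
  induction W with
  | zero => simp [bcat] at hy
  | succ W ih =>
    rcases List.mem_append.mp hy with hy | hy
    · obtain ⟨w, hw, hwy⟩ := ih hy
      exact ⟨w, by omega, hwy⟩
    · exact ⟨W, by omega, by simpa using (List.mem_filter.mp hy).2⟩

lemma bcat_append_of_ne (gs : List (Int × Int × Int)) (x : Int × Int × Int) (W : Nat)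
    (h : ∀ w : Nat, w < W → wkey x ≠ (w : Int)) : bcat (gs ++ [x]) W = bcat gs W := by
  induction W with
  | zero => rfl
  | succ W ih =>
    have hW := h W (by omega)
    simp only [bcat, List.filter_append]
    rw [ih (fun w hw => h w (by omega))]
    simp [hW]

lemma insertBy_append_right (x : Int × Int × Int) (L R : List (Int × Int × Int))
    (hR : ∀ y ∈ R, wkey x < wkey y) :
    PySem.List.insertBy (fun a b => decide (wkey a < wkey b)) x (L ++ R)
      = PySem.List.insertBy (fun a b => decide (wkey a < wkey b)) x L ++ R := by
  induction L with
  | nil =>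
    cases R with
    | nil => rfl
    | cons r R => simp [PySem.List.insertBy, hR r (by simp)]
  | cons l L ih =>
    by_cases hxl : wkey x < wkey l
    · simp [PySem.List.insertBy, hxl]
    · simp [PySem.List.insertBy, hxl, ih]

lemma insertBy_bcat (gs : List (Int × Int × Int)) (x : Int × Int × Int) (W : Nat)
    (h0 : 0 ≤ wkey x) (hW : wkey x < (W : Int)) :
    PySem.List.insertBy (fun a b => decide (wkey a < wkey b)) x (bcat gs W)
      = bcat (gs ++ [x]) W := by
  induction W with
  | zero => exact absurd hW (by omega)
  | succ W ih =>
    by_cases hx : wkey x = (W : Int)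
    · rw [PySem.List.insertBy_of_forall_not_before]
      · simp only [bcat, List.filter_append]
        rw [bcat_append_of_ne gs x W (fun w hw => by rw [hx]; exact_mod_cast by omega)]
        simp [hx, List.append_assoc]
      · intro y hy
        obtain ⟨w, hwlt, hwy⟩ := mem_bcat gs (W + 1) y hy
        simp only [decide_eq_false_iff_not, not_lt, hwy, hx]
        exact_mod_cast by omega
    · have hxW : wkey x < (W : Int) := by
        have : wkey x < ((W : Int) + 1) := by push_cast at hW; omega
        omega
      simp only [bcat]
      rw [insertBy_append_right x _ _ (fun y hy => by
        have := (List.mem_filter.mp hy).2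
        simp at this
        omega), ih hxW]
      simp only [List.filter_append]
      simp [hx]

lemma sorted_eq_bcat (gs : List (Int × Int × Int)) (W : Nat)
    (h : ∀ g ∈ gs, 0 ≤ wkey g ∧ wkey g < (W : Int)) :
    PySem.List.sorted gs wkey false = bcat gs W := by
  induction gs using List.reverseRecOn with
  | nil => rw [PySem.List.sorted_eq_foldl_insertBy]; simp [bcat_nil]
  | append_singleton gs x ih =>
    have hx := h x (by simp)
    have hrest : ∀ g ∈ gs, 0 ≤ wkey g ∧ wkey g < (W : Int) := fun g hg => h g (by simp [hg])
    rw [PySem.List.sorted_eq_foldl_insertBy, List.foldl_append, ← PySem.List.sorted_eq_foldl_insertBy,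
      ih hrest]
    simpa using insertBy_bcat gs x W hx.1 hx.2

-- ---- descending traversal of the buckets is the reversed sorted list ----

lemma pyRange_desc :
    PySem.List.pyRange 125 (-1) (-1) = (List.range 126).reverse.map (fun n => (n : Int)) := by
  decide

lemma flatMap_desc_eq_reverse_bcat (buckets : List (List (Int × Int × Int)))
    (gs : List (Int × Int × Int)) (W : Nat) (hW : W ≤ 126)
    (hb : ∀ w : Nat, w < 126 →
      buckets.getD w [] = gs.filter (fun g => decide (wkey g = (w : Int)))) :
    ((List.range W).reverse.map (fun n => (n : Int))).flatMap
        (fun w => (buckets.getD w.toNat []).reverse)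
      = (bcat gs W).reverse := by
  induction W with
  | zero => simp [bcat]
  | succ W ih =>
    have hstep : ((List.range (W + 1)).reverse.map (fun n => (n : Int)))
        = ((W : Nat) : Int) :: (List.range W).reverse.map (fun n => (n : Int)) := by
      rw [List.range_succ]; simp
    rw [hstep, List.flatMap_cons, ih (by omega)]
    have ht : ((W : Nat) : Int).toNat = W := by simp
    rw [ht, hb W (by omega)]
    simp [bcat, List.reverse_append]

-- ---- A's pop loop is B's flattened scoring loop ----

lemma map_insertBy {α β : Type} (f : α → β) (kA : α → Int) (kB : β → Int) (x : α) (ys : List α)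
    (hx : kB (f x) = kA x) (hys : ∀ y ∈ ys, kB (f y) = kA y) :
    (PySem.List.insertBy (fun a b => decide (kA a < kA b)) x ys).map f
      = PySem.List.insertBy (fun a b => decide (kB a < kB b)) (f x) (ys.map f) := by
  induction ys with
  | nil => rfl
  | cons y ys ih =>
    have h1 : kB (f y) = kA y := hys y (by simp)
    have h2 : ∀ z ∈ ys, kB (f z) = kA z := fun z hz => hys z (by simp [hz])
    by_cases hxy : kA x < kA y
    · simp [PySem.List.insertBy, hxy, hx, h1]
    · simp [PySem.List.insertBy, hxy, hx, h1, ih h2]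

lemma sorted_map_comm {α β : Type} (f : α → β) (kA : α → Int) (kB : β → Int) (xs : List α)
    (h : ∀ x ∈ xs, kB (f x) = kA x) :
    (PySem.List.sorted xs kA false).map f = PySem.List.sorted (xs.map f) kB false := by
  rw [PySem.List.sorted_eq_foldl_insertBy, PySem.List.sorted_eq_foldl_insertBy]
  suffices H : ∀ (xs : List α) (acc : List α), (∀ x ∈ xs, kB (f x) = kA x) →
      (∀ y ∈ acc, kB (f y) = kA y) →
      (xs.foldl (fun acc x => PySem.List.insertBy (fun a b => decide (kA a < kA b)) x acc) acc).map f
        = (xs.map f).foldl (fun acc x => PySem.List.insertBy (fun a b => decide (kB a < kB b)) x acc) (acc.map f) by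
    simpa using H xs [] h (by simp)
  intro xs
  induction xs with
  | nil => intro acc _ _; simp
  | cons x xs ih =>
    intro acc hxs hacc
    have hx : kB (f x) = kA x := hxs x (by simp)
    have hxs2 : ∀ z ∈ xs, kB (f z) = kA z := fun z hz => hxs z (by simp [hz])
    have hacc2 : ∀ y ∈ PySem.List.insertBy (fun a b => decide (kA a < kA b)) x acc, kB (f y) = kA y := by
      intro y hy
      rcases (PySem.List.mem_insertBy _ x y acc).mp hy with rfl | hy
      · exact hx
      · exact hacc y hy
    simp only [List.foldl_cons, List.map_cons]
    rw [ih _ hxs2 hacc2, map_insertBy f kA kB x acc hx hacc]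

lemma pileQ_pop_d (s i d : Int) (hd : 0 < d) : pileQ s i d = pileQ s i (d - 1) ++ ["diamond"] := by
  have h : d.toNat = (d - 1).toNat + 1 := by omega
  simp only [pileQ, h, List.replicate_succ', List.append_assoc]

lemma pileQ_pop_i (s i d : Int) (hd : d ≤ 0) (hi : 0 < i) :
    pileQ s i d = pileQ s (i - 1) d ++ ["iron"] := by
  have hd0 : d.toNat = 0 := by omega
  have h : i.toNat = (i - 1).toNat + 1 := by omega
  simp only [pileQ, hd0, h, List.replicate_succ', List.replicate_zero, List.append_nil,
    List.append_assoc]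

lemma pileQ_pop_s (s i d : Int) (hd : d ≤ 0) (hi : i ≤ 0) (hs : 0 < s) :
    pileQ s i d = pileQ (s - 1) i d ++ ["stone"] := by
  have hd0 : d.toNat = 0 := by omega
  have hi0 : i.toNat = 0 := by omega
  have h : s.toNat = (s - 1).toNat + 1 := by omega
  simp only [pileQ, hd0, hi0, h, List.replicate_succ', List.replicate_zero, List.append_nil]

lemma pileQ_nil (s i d : Int) (hd : d ≤ 0) (hi : i ≤ 0) (hs : s ≤ 0) : pileQ s i d = [] := by
  have hd0 : d.toNat = 0 := by omega
  have hi0 : i.toNat = 0 := by omega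
  have hs0 : s.toNat = 0 := by omega
  simp [pileQ, hd0, hi0, hs0]

lemma loop_eq (bs : List (List String)) :
    (∀ c ∈ bs, ∀ m ∈ c, validM m) → ∀ (d i s ans : Int),
    goA bs (pileQ s i d) ans = scoreFlat (d, i, s, ans) ((bs.map cntB).reverse) := by
  induction bs using List.reverseRecOn with
  | nil =>
    intro _ d i s ans
    rw [goA]
    simp [scoreFlat]
  | append_singleton rest c ih =>
    intro hv d i s ans
    have hc : ∀ m ∈ c, validM m := hv c (by simp)
    have hrest : ∀ c' ∈ rest, ∀ m ∈ c', validM m := fun c' h' => hv c' (by simp [h'])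
    have hmap : ((rest ++ [c]).map cntB).reverse = cntB c :: (rest.map cntB).reverse := by simp
    rw [hmap]
    obtain ⟨wD, wI, wS⟩ := wA_eval
    have hcnt : cntB c = ((c.count "diamond" : Int), (c.count "iron" : Int),
        (c.count "stone" : Int)) := by
      rw [cntB_eq_foldl_cstep, cstep_counts c hc]
      simp
    have hne1 : rest ++ [c] ≠ [] := by simp
    by_cases hd : 0 < d
    · rw [pileQ_pop_d s i d hd, goA,
        dif_pos ⟨hne1, (by simp : pileQ s i (d - 1) ++ ["diamond"] ≠ [])⟩]
      simp only [List.getLast_concat, List.dropLast_concat]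
      rw [PySem.List.foldl_add, sum_map_of_valid _ c hc,
        wD _ (Or.inl rfl), wD _ (Or.inr (Or.inl rfl)), wD _ (Or.inr (Or.inr rfl)),
        ih hrest (d - 1) i s _]
      rw [show scoreFlat (d, i, s, ans) (cntB c :: (rest.map cntB).reverse)
          = scoreFlat (d - 1, i, s, ans + ((c.count "diamond" : Int) + (c.count "iron" : Int)
              + (c.count "stone" : Int))) ((rest.map cntB).reverse) from by
        simp [scoreFlat, mineStep, hd, hcnt]]
      congr 2
      ring_nf
    · by_cases hi : 0 < i
      · rw [pileQ_pop_i s i d (by omega) hi, goA,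
          dif_pos ⟨hne1, (by simp : pileQ s (i - 1) d ++ ["iron"] ≠ [])⟩]
        simp only [List.getLast_concat, List.dropLast_concat]
        rw [PySem.List.foldl_add, sum_map_of_valid _ c hc, wI.1, wI.2.1, wI.2.2,
          ih hrest d (i - 1) s _]
        rw [show scoreFlat (d, i, s, ans) (cntB c :: (rest.map cntB).reverse)
            = scoreFlat (d, i - 1, s, ans + (5 * (c.count "diamond" : Int) + (c.count "iron" : Int)
                + (c.count "stone" : Int))) ((rest.map cntB).reverse) from by
          simp [scoreFlat, mineStep, hd, hi, hcnt]]
        congr 2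
        ring_nf
      · by_cases hs : 0 < s
        · rw [pileQ_pop_s s i d (by omega) (by omega) hs, goA,
            dif_pos ⟨hne1, (by simp : pileQ (s - 1) i d ++ ["stone"] ≠ [])⟩]
          simp only [List.getLast_concat, List.dropLast_concat]
          rw [PySem.List.foldl_add, sum_map_of_valid _ c hc, wS.1, wS.2.1, wS.2.2,
            ih hrest d i (s - 1) _]
          rw [show scoreFlat (d, i, s, ans) (cntB c :: (rest.map cntB).reverse)
              = scoreFlat (d, i, s - 1, ans + (25 * (c.count "diamond" : Int)
                  + 5 * (c.count "iron" : Int) + (c.count "stone" : Int)))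
                  ((rest.map cntB).reverse) from by
            simp [scoreFlat, mineStep, hd, hi, hs, hcnt]]
          congr 2
          ring_nf
        · rw [pileQ_nil s i d (by omega) (by omega) (by omega), goA]
          simp [scoreFlat, mineStep, hd, hi, hs]

-- ===== VERDICT (by name: the statement is the Claim_ definition above) =====
theorem solution_spec : Claim_equal_solution := by
  intro picks minerals _ hpre
  obtain ⟨hlen3, hval⟩ := hpre
  unfold Spec_solution solution solution_alt
  simp only []
  set minerals' := (if picks.sum * 5 < (minerals.length : Int)
    then PySem.List.slice minerals none (some (picks.sum * 5)) else minerals) with hm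
  set bulks := (PySem.List.pyRange 0 (minerals'.length : Int) 5).map
      (fun j => PySem.List.slice minerals' (some j) (some (j + 5))) with hbulks
  set gs := bulks.map cntB with hgs
  set p0 := PySem.List.pyGetD picks 0 0
  set p1 := PySem.List.pyGetD picks 1 0
  set p2 := PySem.List.pyGetD picks 2 0
  have hvalid : ∀ c ∈ bulks, ∀ m ∈ c, validM m := by
    intro c hcmem m hm'
    rcases List.mem_map.mp hcmem with ⟨j, _, rfl⟩
    exact hval m (PySem.List.mem_of_mem_slice _ _ _ hm')
  have hchunk : ∀ c ∈ bulks, c.length ≤ 5 := by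
    intro c hcmem
    rcases List.mem_map.mp hcmem with ⟨j, hj, rfl⟩
    have hj0 : 0 ≤ j := ((PySem.List.mem_pyRange_iff_of_pos (by omega) j).mp hj).1
    rw [PySem.List.slice_toNat _ hj0 (by omega)]
    have h5 : (j + 5).toNat - j.toNat = 5 := by omega
    rw [h5]
    simp [List.length_take]
  have hkb : ∀ g ∈ gs, 0 ≤ wkey g ∧ wkey g < 126 := by
    intro g hg
    rcases List.mem_map.mp hg with ⟨c, hcmem, rfl⟩
    exact wkey_cntB_bounds c (hchunk c hcmem)
  have hkeys : ∀ c ∈ bulks, wkey (cntB c) = (c.map (fun m => wA "stone" m)).sum :=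
    fun c hcmem => wkey_cntB c (hvalid c hcmem)
  -- A's side: pile → counters, sorted bulks → reversed count triples
  rw [PySem.List.pyRepeat_singleton, PySem.List.pyRepeat_singleton,
    PySem.List.pyRepeat_singleton]
  have hpile : List.replicate p2.toNat "stone" ++ List.replicate p1.toNat "iron"
      ++ List.replicate p0.toNat "diamond" = pileQ p2 p1 p0 := rfl
  rw [hpile, loop_eq _ (fun c hcs => hvalid c ((PySem.List.mem_sorted _ _ _ _).mp hcs)) p0 p1 p2 0,
    sorted_map_comm cntB (fun x => (x.map (fun m => wA "stone" m)).sum) wkey bulks hkeys,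
    ← hgs, sorted_eq_bcat gs 126 (by exact_mod_cast hkb)]
  -- B's side: the bucket fold and the descending sweep
  have hfold : (PySem.List.pyRange 0 (minerals'.length : Int) 5).foldl
      (fun bs j => bupd bs (cntB (PySem.List.slice minerals' (some j) (some (j + 5)))))
      (List.replicate 126 [])
      = gs.foldl bupd (List.replicate 126 []) := by
    rw [hgs, hbulks, List.map_map, List.foldl_map]
    rfl
  rw [hfold, runWeights_eq_scoreFlat, pyRange_desc,
    flatMap_desc_eq_reverse_bcat _ gs 126 le_rfl
      (fun w hw => by
        rw [foldl_bupd_getD gs hkb (List.replicate 126 []) (by simp) w hw,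
          List.getD_eq_getElem?_getD, List.getElem?_replicate]
        split <;> rfl)]
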